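-- pv_equiv track=rewrite | github.com/zyzzhaoyuzhe/Med-NLP | utils.py | find_dic
-- ===== SOURCE A (Python) =====
-- def find_dic(s, dic):
--     output = []
--     for k, v in dic.items():
--         for vv in v:
--             st = s.find(vv)
--             if st != -1:
--                 ed = st + len(vv)
--                 output.append((st, ed, k))
--                 break
--     return output
-- ===== SOURCE B (Python) =====
-- def find_dic(s, dic):
--     n = len(s)
--     lengths = {len(vv) for v in dic.values() for vv in v}
--     subs = {s[i:i + L] for L in lengths for i in range(n - L + 1)}
--     output = []
--     for k, v in dic.items():
--         hit = next((vv for vv in v if vv in subs), None)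
--         if hit is not None:
--             st = s.find(hit)
--             output.append((st, st + len(hit), k))
--     return output
-- ===== Notes on version B (the rewrite author's own statement) =====
-- stated objective: alternative
-- what changed: B builds, once, a hash set of all substrings of s whose lengths occur among the patterns, then selects each key's first pattern by set membership (calling s.find only on the selected pattern), instead of running s.find on every pattern until one hits.
import Mathlib
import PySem

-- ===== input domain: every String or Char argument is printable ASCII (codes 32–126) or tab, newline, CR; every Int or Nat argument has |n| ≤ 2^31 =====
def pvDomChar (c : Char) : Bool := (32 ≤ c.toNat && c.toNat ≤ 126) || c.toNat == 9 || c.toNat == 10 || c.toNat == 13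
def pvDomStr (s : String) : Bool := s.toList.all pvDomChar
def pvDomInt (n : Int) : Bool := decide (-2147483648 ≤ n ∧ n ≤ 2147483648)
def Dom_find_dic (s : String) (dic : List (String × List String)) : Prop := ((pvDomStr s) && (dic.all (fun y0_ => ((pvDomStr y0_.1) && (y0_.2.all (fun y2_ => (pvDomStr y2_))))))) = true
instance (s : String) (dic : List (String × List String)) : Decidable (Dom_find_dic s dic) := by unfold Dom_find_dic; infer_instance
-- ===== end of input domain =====

-- B replaces A's per-pattern s.find scans by one substring set built from s up front
-- (set membership picks each key's first matching pattern; objective: alternative, not faster).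

-- ===== PORT A =====
-- inner 'for vv in v: st = s.find(vv); if st != -1: ...; break'
def aInner (s : String) (k : String) : List String → List (Int × Int × String) → List (Int × Int × String)
  | [], output => output
  | vv :: rest, output =>
    let st := PySem.Str.find s vv
    if st ≠ -1 then output ++ [(st, st + PySem.Str.len vv, k)]
    else aInner s k rest output

def find_dic (s : String) (dic : List (String × List String)) : List (Int × Int × String) :=
  dic.foldl (fun output kv => aInner s kv.1 kv.2 output) []

-- ===== PORT B =====
-- lengths = {len(vv) for v in dic.values() for vv in v}
def altLens (dic : List (String × List String)) : PySem.Set Int :=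
  PySem.Set.ofList (dic.flatMap (fun kv => kv.2.map (fun vv => PySem.Str.len vv)))

-- subs = {s[i:i+L] for L in lengths for i in range(n - L + 1)}
def altSubs (s : String) (lens : List Int) : PySem.Set String :=
  PySem.Set.ofList (lens.flatMap (fun L =>
    (PySem.List.pyRange 0 (PySem.Str.len s - L + 1) 1).map
      (fun i => PySem.Str.slice s (some i) (some (i + L)))))

def find_dic_alt (s : String) (dic : List (String × List String)) : List (Int × Int × String) :=
  let lens := altLens dic
  let subs := altSubs s lens
  dic.foldl (fun output kv =>
    match kv.2.find? (fun vv => PySem.Set.contains subs vv) with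
    | some hit => output ++ [(PySem.Str.find s hit, PySem.Str.find s hit + PySem.Str.len hit, kv.1)]
    | none => output) []

-- ===== PRECONDITION & SPEC =====
def Spec_find_dic (s : String) (dic : List (String × List String)) (out : List (Int × Int × String)) : Prop := out = find_dic_alt s dic
instance (s : String) (dic : List (String × List String)) (out : List (Int × Int × String)) : Decidable (Spec_find_dic s dic out) := by unfold Spec_find_dic; infer_instance

-- ===== CLAIM (what is proved, stated in full; the proofs are below) =====
def Claim_equal_find_dic : Prop := ∀ (s : String) (dic : List (String × List String)), Dom_find_dic s dic → Spec_find_dic s dic (find_dic s dic)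

-- ===== LEMMAS AND PROOFS =====

-- membership in the length-filtered substring set is exactly "s.find(vv) != -1",
-- provided vv's length is one of the indexed lengths
theorem mem_altSubs (s : String) (lens : List Int) (vv : String)
    (hnn : ∀ L ∈ lens, 0 ≤ L) (hL : PySem.Str.len vv ∈ lens) :
    vv ∈ altSubs s lens ↔ PySem.Str.find s vv ≠ -1 := by
  rw [PySem.Str.find_ne_neg_one_iff]
  unfold altSubs
  rw [PySem.Set.mem_ofList]
  simp only [List.mem_flatMap, List.mem_map, PySem.List.mem_pyRange_one]
  constructor
  · rintro ⟨L, hLmem, i, ⟨hi0, _⟩, rfl⟩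
    lift i to ℕ using hi0 with a
    have hL0 : 0 ≤ (a : Int) + L := by
      have := hnn L hLmem; positivity
    rw [show ((a : Int) + L) = ((((a : Int) + L).toNat : ℕ) : Int) from (Int.toNat_of_nonneg hL0).symm,
      PySem.Str.toList_slice, PySem.Chars.slice_eq_listSlice, PySem.List.slice_natCast]
    exact ((List.take_prefix _ _).isInfix).trans ((List.drop_suffix _ _).isInfix)
  · intro hinf
    obtain ⟨t, u, h⟩ := hinf
    have hlen : t.length + vv.toList.length + u.length = s.toList.length := by
      have := congrArg List.length h
      simp only [List.length_append] at this
      omega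
    refine ⟨PySem.Str.len vv, hL, (t.length : Int), ⟨by positivity, ?_⟩, ?_⟩
    · rw [PySem.Str.len_eq, PySem.Str.len_eq]; omega
    · rw [← String.toList_inj, PySem.Str.toList_slice, PySem.Chars.slice_eq_listSlice,
        PySem.Str.len_eq]
      have : ((t.length : Int) + ↑vv.toList.length) = ((t.length + vv.toList.length : ℕ) : Int) := by push_cast; ring
      rw [this, PySem.List.slice_natCast, ← h]
      have hd : (t ++ vv.toList ++ u).drop t.length = vv.toList ++ u := by
        rw [List.append_assoc, List.drop_left]
      rw [hd, Nat.add_sub_cancel_left, List.take_left]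

theorem inner_eq (s k : String) (lens : List Int) (v : List String)
    (hnn : ∀ L ∈ lens, 0 ≤ L) (hv : ∀ vv ∈ v, PySem.Str.len vv ∈ lens) (out : List (Int × Int × String)) :
    aInner s k v out =
      (match v.find? (fun vv => PySem.Set.contains (altSubs s lens) vv) with
       | some hit => out ++ [(PySem.Str.find s hit, PySem.Str.find s hit + PySem.Str.len hit, k)]
       | none => out) := by
  induction v with
  | nil => simp [aInner]
  | cons vv rest ih =>
    have hvv := hv vv (List.mem_cons_self ..)
    have hrest : ∀ w ∈ rest, PySem.Str.len w ∈ lens := fun w hw => hv w (List.mem_cons_of_mem _ hw)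
    by_cases hm : vv ∈ altSubs s lens
    · have h : ¬ PySem.Chars.find s.toList vv.toList = -1 := by
        have := (mem_altSubs s lens vv hnn hvv).1 hm
        simpa using this
      simp [aInner, List.find?, hm, h]
    · have h : PySem.Chars.find s.toList vv.toList = -1 := by
        by_contra hne
        exact hm ((mem_altSubs s lens vv hnn hvv).2 (by simpa using hne))
      simp [aInner, List.find?, hm, h, ih hrest]

theorem fold_eq (s : String) (lens : List Int) (d : List (String × List String))
    (hnn : ∀ L ∈ lens, 0 ≤ L) (hd : ∀ kv ∈ d, ∀ vv ∈ kv.2, PySem.Str.len vv ∈ lens) (out : List (Int × Int × String)) :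
    d.foldl (fun output kv => aInner s kv.1 kv.2 output) out =
      d.foldl (fun output kv =>
        match kv.2.find? (fun vv => PySem.Set.contains (altSubs s lens) vv) with
        | some hit => output ++ [(PySem.Str.find s hit, PySem.Str.find s hit + PySem.Str.len hit, kv.1)]
        | none => output) out := by
  induction d generalizing out with
  | nil => rfl
  | cons kv rest ih =>
    simp only [List.foldl_cons]
    rw [inner_eq s kv.1 lens kv.2 hnn (hd kv (List.mem_cons_self ..)),
      ih (fun w hw => hd w (List.mem_cons_of_mem _ hw))]

theorem find_dic_spec : Claim_equal_find_dic := by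
  intro s dic _
  unfold Spec_find_dic find_dic find_dic_alt
  exact fold_eq s (altLens dic) dic
    (fun L hLm => by
      unfold altLens at hLm
      rw [PySem.Set.mem_ofList] at hLm
      obtain ⟨kv, _, hLm⟩ := List.mem_flatMap.1 hLm
      obtain ⟨vv, _, rfl⟩ := List.mem_map.1 hLm
      rw [PySem.Str.len_eq]; positivity)
    (fun kv hkv vv hvv => by
      unfold altLens
      rw [PySem.Set.mem_ofList]
      exact List.mem_flatMap.2 ⟨kv, hkv, List.mem_map.2 ⟨vv, hvv, rfl⟩⟩) []
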